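-- pv_equiv track=rewrite | github.com/simonavrillon/MUedit2 | python/src/muedit/io/loaders.py | _has_decomposition_markers
-- ===== SOURCE A (Python) =====
-- def _has_decomposition_markers(field_names: set[str]) -> bool:
--     lower = {str(name).lower() for name in field_names}
--     has_pulse = any(
--         k in lower for k in {"pulset", "pulsetrain", "pulse_train", "pulse_t", "pulse_trains"}
--     )
--     has_distime = any(
--         k in lower for k in {"dischargetimes", "discharge_times", "distime", "distimes"}
--     )
--     return has_pulse and has_distime
-- ===== SOURCE B (Python) =====
-- _PULSE = frozenset({"pulset", "pulsetrain", "pulse_train", "pulse_t", "pulse_trains"})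
-- _DISTIME = frozenset({"dischargetimes", "discharge_times", "distime", "distimes"})
--
--
-- def _has_decomposition_markers(field_names):
--     has_pulse = False
--     has_distime = False
--     for name in field_names:
--         low = str(name).lower()
--         if low in _PULSE:
--             has_pulse = True
--         elif low in _DISTIME:
--             has_distime = True
--         if has_pulse and has_distime:
--             return True
--     return has_pulse and has_distime
-- ===== Notes on version B (the rewrite author's own statement) =====
-- stated objective: alternative
-- what changed: B makes a single pass over field_names with two flags and an early return once both markers are seen, instead of A's building a lowercased set and scanning it twice with any() over the fixed marker keys.
import Mathlib
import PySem

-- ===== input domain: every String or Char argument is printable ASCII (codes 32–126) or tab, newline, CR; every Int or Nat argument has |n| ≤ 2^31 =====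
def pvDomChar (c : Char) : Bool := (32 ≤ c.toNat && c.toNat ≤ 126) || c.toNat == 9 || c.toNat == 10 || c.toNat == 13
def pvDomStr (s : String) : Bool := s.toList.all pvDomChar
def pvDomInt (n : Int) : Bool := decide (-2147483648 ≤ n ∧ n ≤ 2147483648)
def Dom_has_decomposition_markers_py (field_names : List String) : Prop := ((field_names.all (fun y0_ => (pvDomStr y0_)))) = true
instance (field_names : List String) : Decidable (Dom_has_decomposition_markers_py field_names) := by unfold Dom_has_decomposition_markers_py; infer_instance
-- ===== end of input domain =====

-- B replaces A's lowercased-set construction plus two any() scans over the marker keys by a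
-- single pass over field_names with two flags and an early return; same O(n) cost, different decomposition.

-- ===== PORT A =====
-- the two fixed marker-key sets, as they appear in A's source
def pulseKeys : List String := ["pulset", "pulsetrain", "pulse_train", "pulse_t", "pulse_trains"]
def distimeKeys : List String := ["dischargetimes", "discharge_times", "distime", "distimes"]

def has_decomposition_markers_py (field_names : List String) : Bool :=
  let lower : PySem.Set String := PySem.Set.ofList (field_names.map (fun name => PySem.Str.lower name))
  let has_pulse := pulseKeys.any (fun k => PySem.Set.contains lower k)
  let has_distime := distimeKeys.any (fun k => PySem.Set.contains lower k)
  has_pulse && has_distime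

-- ===== PORT B =====
-- the loop of Source B: two flags, early return once both are set
def altLoop : List String → Bool → Bool → Bool
  | [], has_pulse, has_distime => has_pulse && has_distime
  | name :: rest, has_pulse, has_distime =>
    let low := PySem.Str.lower name
    let has_pulse' := if pulseKeys.contains low then true else has_pulse
    let has_distime' :=
      if pulseKeys.contains low then has_distime
      else if distimeKeys.contains low then true else has_distime
    if has_pulse' && has_distime' then true
    else altLoop rest has_pulse' has_distime'

def has_decomposition_markers_py_alt (field_names : List String) : Bool :=
  altLoop field_names false false

-- ===== PRECONDITION & SPEC =====
def Spec_has_decomposition_markers_py (field_names : List String) (out : Bool) : Prop := out = has_decomposition_markers_py_alt field_names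
instance (field_names : List String) (out : Bool) : Decidable (Spec_has_decomposition_markers_py field_names out) := by unfold Spec_has_decomposition_markers_py; infer_instance

-- ===== CLAIM (what is proved, stated in full; the proofs are below) =====
def Claim_equal_has_decomposition_markers_py : Prop := ∀ (field_names : List String), Dom_has_decomposition_markers_py field_names → Spec_has_decomposition_markers_py field_names (has_decomposition_markers_py field_names)

-- ===== LEMMAS AND PROOFS =====

-- the two fixed marker-key sets are disjoint
theorem not_pulse_of_distime (s : String) (h : distimeKeys.contains s = true) :
    pulseKeys.contains s = false := by
  simp only [distimeKeys, List.contains_eq_mem, decide_eq_true_eq, List.mem_cons,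
    List.not_mem_nil, or_false] at h
  rcases h with rfl | rfl | rfl | rfl <;> decide

-- the loop computes "some name hits a pulse key (or the flag is set)" && same for distime
theorem altLoop_eq (l : List String) (hp hd : Bool) :
    altLoop l hp hd =
      ((hp || l.any (fun n => pulseKeys.contains (PySem.Str.lower n))) &&
       (hd || l.any (fun n => distimeKeys.contains (PySem.Str.lower n)))) := by
  induction l generalizing hp hd with
  | nil => simp [altLoop]
  | cons n rest ih =>
    simp only [altLoop, List.any_cons, ih]
    by_cases h2 : distimeKeys.contains (PySem.Str.lower n) = true
    · simp only [h2, not_pulse_of_distime _ h2]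
      cases hp <;> cases hd <;> simp
    · rw [Bool.not_eq_true] at h2
      simp only [h2]
      generalize pulseKeys.contains (PySem.Str.lower n) = p
      cases p <;> cases hp <;> cases hd <;> simp

-- A's "k in set(lowered names)" scan over the fixed keys equals B's scan over the names
theorem any_keys_comm (keys : List String) (field_names : List String) :
    keys.any (fun k =>
        PySem.Set.contains (PySem.Set.ofList (field_names.map (fun name => PySem.Str.lower name))) k)
      = field_names.any (fun n => keys.contains (PySem.Str.lower n)) := by
  rw [Bool.eq_iff_iff]
  simp only [List.any_eq_true, PySem.Set.contains, List.contains_eq_mem,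
    decide_eq_true_eq, PySem.Set.mem_ofList, List.mem_map]
  constructor
  · rintro ⟨k, hk, n, hn, rfl⟩; exact ⟨n, hn, hk⟩
  · rintro ⟨n, hn, hk⟩; exact ⟨_, hk, n, hn, rfl⟩

-- ===== VERDICT (by name: the statement is the Claim_ definition above) =====
theorem has_decomposition_markers_py_spec : Claim_equal_has_decomposition_markers_py := by
  intro field_names _
  unfold Spec_has_decomposition_markers_py
  simp only [has_decomposition_markers_py, has_decomposition_markers_py_alt]
  rw [altLoop_eq, any_keys_comm, any_keys_comm]
  simp
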